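-- pv_equiv track=rewrite | github.com/ashutoshgaur0809/Array_Leetcode | FiboType2.py | solution
-- ===== SOURCE A (Python) =====
-- def sum_of_digits(x):
--     # Helper function to calculate sum of digits of a number
--     return sum(int(digit) for digit in str(x))
--
-- def solution(N):
--     if N == 0:
--         return 0
--     if N == 1:
--         return 1
--
--     # Initialize the first two elements
--     a = [0, 1]
--
--     # Generate elements until we reach the nth element
--     for i in range(2, N + 1):
--         next_value = sum_of_digits(a[i - 1]) + sum_of_digits(a[i - 2])
--         a.append(next_value)
--
--     return a[N]
-- ===== SOURCE B (Python) =====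
-- def digit_sum(x):
--     s = 0
--     while x > 0:
--         s += x % 10
--         x //= 10
--     return s
--
-- def solution(N):
--     terms = [0, 1]
--     if N < len(terms):
--         return terms[N]
--     seen = {(0, 1): 0}
--     a, b = 0, 1
--     idx = 0
--     while True:
--         a, b = b, digit_sum(a) + digit_sum(b)
--         idx += 1
--         if (a, b) in seen:
--             start = seen[(a, b)]
--             period = idx - start
--             return terms[start + (N - start) % period]
--         seen[(a, b)] = idx
--         terms.append(b)
--         if N < len(terms):
--             return terms[N]
-- ===== Notes on version B (the rewrite author's own statement) =====
-- stated objective: faster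
-- what changed: B replaces A's O(N) list-building recurrence by cycle detection on the bounded (prev, cur) pair state followed by a modular index jump (the state repeats: index 27 equals index 3, period 24), so the loop runs at most 27 iterations for any N; digit sums are computed arithmetically instead of via str().
import Mathlib
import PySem

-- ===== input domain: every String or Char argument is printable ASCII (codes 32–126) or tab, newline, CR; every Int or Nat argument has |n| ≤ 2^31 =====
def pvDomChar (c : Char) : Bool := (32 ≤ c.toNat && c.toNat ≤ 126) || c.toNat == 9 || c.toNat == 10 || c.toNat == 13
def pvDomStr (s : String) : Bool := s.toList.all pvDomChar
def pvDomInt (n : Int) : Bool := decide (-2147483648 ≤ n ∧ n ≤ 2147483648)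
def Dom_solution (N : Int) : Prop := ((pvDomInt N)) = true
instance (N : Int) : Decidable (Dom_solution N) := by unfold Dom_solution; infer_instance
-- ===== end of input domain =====

-- B replaces A's O(N) list-building recurrence by cycle detection on the bounded (prev, cur)
-- pair state plus a modular index jump; measurably faster (asymptotic: at most 27 iterations).

-- ===== PORT A =====
-- sum(int(digit) for digit in str(x)); int(digit) is ofChars? [c] (.getD 0 unreachable:
-- A only applies it to nonnegative values, whose str() consists of digit characters)
def sum_of_digits (x : Int) : Int :=
  ((PySem.Int.toChars x).map (fun c => (PySem.Int.ofChars? [c]).getD 0)).sum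

def solution (N : Int) : Int :=
  if N = 0 then 0
  else if N = 1 then 1
  else
    let a : List Int := [0, 1]
    let a := (PySem.List.pyRange 2 (N + 1) 1).foldl
      (fun a i =>
        a ++ [sum_of_digits (PySem.List.pyGetD a (i - 1) 0) +
              sum_of_digits (PySem.List.pyGetD a (i - 2) 0)]) a
    -- a[N]: in range for every N of Pre_solution (for -2 ≤ N ≤ -1 Python's negative
    -- indexing reads the seeds; N ≤ -3 raises IndexError and is excluded by Pre_solution)
    PySem.List.pyGetD a N 0

-- ===== PORT B =====
-- while x > 0: s += x % 10; x //= 10  (fuel-bounded structural recursion; 40 ≫ the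
-- number of decimal digits of any value reached, so the 0-fuel branch is unreachable)
def digitSumGo : Nat → Int → Int → Int
  | 0, _, s => s
  | f + 1, x, s =>
      if 0 < x then digitSumGo f (PySem.Int.floordiv x 10) (s + PySem.Int.mod x 10) else s

def digit_sum (x : Int) : Int := digitSumGo 40 x 0

-- the 'while True' loop of Source B; fuel 1000 ≫ 27, the iteration at which the state
-- pair provably repeats, so the 0-fuel branch is unreachable
def solLoop (N : Int) : List Int → PySem.Dict (Int × Int) Int → Int → Int → Int → Nat → Int
  | _, _, _, _, _, 0 => 0
  | terms, seen, a, b, idx, fuel + 1 =>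
      let a' := b
      let b' := digit_sum a + digit_sum b
      let idx' := idx + 1
      if seen.contains (a', b') then
        let start := (seen.get? (a', b')).getD 0
        let period := idx' - start
        PySem.List.pyGetD terms (start + PySem.Int.mod (N - start) period) 0
      else
        let seen' := seen.insert (a', b') idx'
        let terms' := terms ++ [b']
        if N < (terms'.length : Int) then PySem.List.pyGetD terms' N 0
        else solLoop N terms' seen' a' b' idx' fuel

def solution_alt (N : Int) : Int :=
  let terms : List Int := [0, 1]
  if N < (terms.length : Int) then PySem.List.pyGetD terms N 0
  else solLoop N terms (PySem.Dict.empty.insert (0, 1) 0) 0 1 0 1000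

-- ===== PRECONDITION & SPEC =====
-- Pre_ excludes exactly N ≤ -3, where A (and B) raise IndexError on a[N] / terms[N].
def Pre_solution (N : Int) : Prop := -2 ≤ N
instance (N : Int) : Decidable (Pre_solution N) := by unfold Pre_solution; infer_instance
def pvWitness_solution : Int := 5

def Spec_solution (N : Int) (out : Int) : Prop := out = solution_alt N
instance (N : Int) (out : Int) : Decidable (Spec_solution N out) := by unfold Spec_solution; infer_instance

-- ===== CLAIM (what is proved, stated in full; the proofs are below) =====
def Claim_equal_solution : Prop := ∀ (N : Int), Dom_solution N → Pre_solution N → Spec_solution N (solution N)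

-- ===== LEMMAS AND PROOFS =====

-- the pair-state step and the abstract sequence term n
def pvStep (p : Int × Int) : Int × Int := (p.2, digit_sum p.1 + digit_sum p.2)
def pvTerm (n : Nat) : Int := (pvStep^[n] (0, 1)).1

-- the 27 distinct pair states (indices 0..26); state 27 = state 3 again
def pvS : List (Int × Int) :=
  [(0, 1), (1, 1), (1, 2), (2, 3), (3, 5), (5, 8), (8, 13), (13, 12), (12, 7), (7, 10),
   (10, 8), (8, 9), (9, 17), (17, 17), (17, 16), (16, 15), (15, 13), (13, 10), (10, 5),
   (5, 6), (6, 11), (11, 8), (8, 10), (10, 9), (9, 10), (10, 10), (10, 2)]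

-- terms 0..28 of the sequence
def pvTermsC : List Int :=
  [0, 1, 1, 2, 3, 5, 8, 13, 12, 7, 10, 8, 9, 17, 17, 16, 15, 13, 10, 5, 6, 11, 8, 10, 9,
   10, 10, 2, 3]

def pvPairC (k : Nat) : Int × Int := (pvTermsC.getD k 0, pvTermsC.getD (k + 1) 0)

def pvSeenC : Nat → PySem.Dict (Int × Int) Int
  | 0 => PySem.Dict.empty.insert (0, 1) 0
  | k + 1 => (pvSeenC k).insert (pvPairC (k + 1)) ((k : Int) + 1)

lemma pvS_closed : ∀ p ∈ pvS, pvStep p ∈ pvS := by decide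

lemma pvMemS : ∀ n : Nat, pvStep^[n] (0, 1) ∈ pvS := by
  intro n
  induction n with
  | zero => decide
  | succ n ih =>
      rw [Function.iterate_succ_apply']
      exact pvS_closed _ ih

lemma pvDs_eq : ∀ p ∈ pvS, sum_of_digits p.1 = digit_sum p.1 := by decide

lemma pvTerm_succ (n : Nat) : pvTerm (n + 1) = (pvStep^[n] (0, 1)).2 := by
  unfold pvTerm
  rw [Function.iterate_succ_apply']
  rfl

lemma pvTerm_rec (n : Nat) :
    pvTerm (n + 2) = digit_sum (pvTerm n) + digit_sum (pvTerm (n + 1)) := by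
  rw [show n + 2 = (n + 1) + 1 from rfl, pvTerm_succ (n + 1),
    Function.iterate_succ_apply', pvTerm_succ n]
  rfl

lemma pvTerm_rec' (n : Nat) :
    pvTerm (n + 2) = sum_of_digits (pvTerm n) + sum_of_digits (pvTerm (n + 1)) := by
  have hm := pvMemS n
  have e1 : sum_of_digits (pvTerm n) = digit_sum (pvTerm n) := pvDs_eq _ hm
  have e2 : sum_of_digits (pvTerm (n + 1)) = digit_sum (pvTerm (n + 1)) := by
    have := pvDs_eq _ (pvMemS (n + 1))
    exact this
  rw [e1, e2, pvTerm_rec]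

-- A's loop builds exactly the first M+3 terms
lemma pvBuildA (M : Nat) :
    (PySem.List.pyRange 2 ((M : Int) + 3) 1).foldl
      (fun a i =>
        a ++ [sum_of_digits (PySem.List.pyGetD a (i - 1) 0) +
              sum_of_digits (PySem.List.pyGetD a (i - 2) 0)]) [0, 1]
      = (List.range (M + 3)).map pvTerm := by
  induction M with
  | zero => decide
  | succ M ih =>
      rw [show ((M + 1 : Nat) : Int) + 3 = ((M : Int) + 3) + 1 by push_cast; ring,
        PySem.List.pyRange_one_succ_right (by omega), List.foldl_append, ih]
      simp only [List.foldl_cons, List.foldl_nil]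
      rw [show (M : Int) + 3 - 1 = ((M + 2 : Nat) : Int) by push_cast; ring,
        show (M : Int) + 3 - 2 = ((M + 1 : Nat) : Int) by push_cast; ring,
        PySem.List.pyGetD_natCast, PySem.List.pyGetD_natCast,
        PySem.List.getD_map_range _ _ _ _ (by omega),
        PySem.List.getD_map_range _ _ _ _ (by omega)]
      have hrec : pvTerm (M + 3) = sum_of_digits (pvTerm (M + 2)) + sum_of_digits (pvTerm (M + 1)) := by
        rw [show M + 3 = (M + 1) + 2 from rfl, pvTerm_rec' (M + 1)]; ring
      simp [List.range_succ, hrec]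

lemma pvA_char (N : Int) (h : 2 ≤ N) : solution N = pvTerm N.toNat := by
  obtain ⟨M, hM⟩ : ∃ M : Nat, N = (M : Int) + 2 := ⟨(N - 2).toNat, by omega⟩
  subst hM
  unfold solution
  rw [if_neg (by omega), if_neg (by omega)]
  rw [show (M : Int) + 2 + 1 = (M : Int) + 3 by ring]
  simp only [pvBuildA M]
  rw [show (M : Int) + 2 = ((M + 2 : Nat) : Int) by push_cast; ring,
    PySem.List.pyGetD_natCast, PySem.List.getD_map_range _ _ _ _ (by omega)]
  congr 1

-- the B loop from state k (k ≤ 26) returns the cycle-jump value for N ≥ 28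


lemma pvLoopC_zero (N : Int) (_hN : 28 ≤ N) :
    solLoop N (pvTermsC.take (26 + 2)) (pvSeenC 26) (pvTermsC.getD 26 0)
      (pvTermsC.getD (26 + 1) 0) ((26 : Nat) : Int) (1000 - 26)
      = PySem.List.pyGetD (pvTermsC.take 28) (3 + PySem.Int.mod (N - 3) 24) 0 := by
  rw [show (1000 - 26 : Nat) = 973 + 1 from rfl, solLoop]
  norm_num
  have e1 : (pvTermsC[26]?.getD 0 : Int) = 10 := by decide
  have e2 : (pvTermsC[27]?.getD 0 : Int) = 2 := by decide
  rw [e1, e2]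
  rw [show digit_sum 10 + digit_sum 2 = 3 from by decide]
  rw [if_pos (show (pvSeenC 26).contains ((2 : Int), (3 : Int)) = true from by decide)]
  rw [show (((pvSeenC 26).get? ((2 : Int), (3 : Int))).getD 0 : Int) = 3 from by decide]
  rw [PySem.Int.mod_eq_emod_of_pos (by norm_num)]
  norm_num

lemma pvF1 : ∀ k < 27, digit_sum (pvTermsC.getD k 0) + digit_sum (pvTermsC.getD (k + 1) 0)
    = pvTermsC.getD (k + 2) 0 := by decide
lemma pvF2 : ∀ k < 26, (pvSeenC k).contains (pvTermsC.getD (k + 1) 0, pvTermsC.getD (k + 2) 0) = false := by decide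
lemma pvF3 : ∀ k < 26, pvTermsC.take (k + 2) ++ [pvTermsC.getD (k + 2) 0] = pvTermsC.take (k + 3) := by decide
lemma pvF5 : ∀ k < 26, (pvTermsC.take (k + 3)).length = k + 3 := by decide

lemma pvLoopC : ∀ (j k : Nat), k + j = 26 → ∀ N : Int, 28 ≤ N →
    solLoop N (pvTermsC.take (k + 2)) (pvSeenC k) (pvTermsC.getD k 0)
      (pvTermsC.getD (k + 1) 0) (k : Int) (1000 - k)
      = PySem.List.pyGetD (pvTermsC.take 28) (3 + PySem.Int.mod (N - 3) 24) 0 := by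
  intro j
  induction j with
  | zero =>
      intro k hk N hN
      have hk26 : k = 26 := by omega
      subst hk26
      exact pvLoopC_zero N hN

  | succ j ih =>
      intro k hk N hN
      have hk' : k < 26 := by omega
      rw [show 1000 - k = (999 - k) + 1 by omega, solLoop]
      simp only [pvF1 k (by omega)]
      rw [if_neg (by simpa using pvF2 k hk')]
      simp only [pvF3 k hk']
      rw [if_neg (by rw [pvF5 k hk']; push_cast; omega)]
      rw [show ((k : Int) + 1) = ((k + 1 : Nat) : Int) by push_cast; ring,
        show (999 - k : Nat) = 1000 - (k + 1) by omega]
      exact ih (k + 1) (by omega) N hN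


lemma pvB_char (N : Int) (h : 28 ≤ N) :
    solution_alt N = PySem.List.pyGetD (pvTermsC.take 28) (3 + PySem.Int.mod (N - 3) 24) 0 := by
  unfold solution_alt
  rw [if_neg (by simp; omega)]
  have h0 := pvLoopC 26 0 rfl N h
  simpa using h0

lemma pvTerm_add24 (k : Nat) : pvTerm (3 + k + 24) = pvTerm (3 + k) := by
  have h27 : pvStep^[27] ((0 : Int), (1 : Int)) = pvStep^[3] (0, 1) := by decide
  unfold pvTerm
  have : pvStep^[3 + k + 24] ((0 : Int), (1 : Int)) = pvStep^[3 + k] (0, 1) := by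
    have e : 3 + k + 24 = k + 27 := by omega
    rw [e, Function.iterate_add_apply, h27, ← Function.iterate_add_apply]
    congr 1
    omega
  rw [this]

lemma pvTerm_mod (q r : Nat) : pvTerm (3 + (24 * q + r)) = pvTerm (3 + r) := by
  induction q with
  | zero => simp
  | succ q ih =>
      have e : 3 + (24 * (q + 1) + r) = 3 + (24 * q + r) + 24 := by ring
      rw [e, pvTerm_add24, ih]

lemma pvReduce (N : Int) (h : 28 ≤ N) :
    pvTerm N.toNat = PySem.List.pyGetD (pvTermsC.take 28) (3 + PySem.Int.mod (N - 3) 24) 0 := by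
  rw [PySem.Int.mod_eq_emod_of_pos (by norm_num)]
  obtain ⟨k, hk, hkeq⟩ : ∃ k : Nat, k < 24 ∧ (N - 3) % 24 = (k : Int) :=
    ⟨((N - 3) % 24).toNat, by omega, by omega⟩
  rw [hkeq]
  obtain ⟨q, hq⟩ : ∃ q : Nat, N.toNat = 3 + (24 * q + k) := ⟨(N.toNat - 3 - k) / 24, by omega⟩
  rw [hq, pvTerm_mod]
  rw [show (3 : Int) + (k : Int) = ((3 + k : Nat) : Int) by push_cast; ring,
    PySem.List.pyGetD_natCast]
  interval_cases k <;> decide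

-- ===== VERDICT (by name: the statement is the Claim_ definition above) =====
theorem solution_spec : Claim_equal_solution := by
  intro N _ hpre
  unfold Spec_solution
  by_cases hN : N < 28
  · unfold Pre_solution at hpre
    interval_cases N <;> decide
  · rw [not_lt] at hN
    rw [pvA_char N (by omega), pvB_char N hN, pvReduce N hN]
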